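-- pv_equiv track=rewrite | github.com/t-tsekov/codefights-solutions | interview/countVowelConsonant.py | countVowelConsonant
-- ===== SOURCE A (Python) =====
-- def countVowelConsonant(s):
--     vowels = ['a', 'e', 'i', 'o', 'u']
--     sum = 0
--     for c in s:
--         if c in vowels:
--             sum+= 1
--         else:
--             sum += 2
--     return sum
-- ===== SOURCE B (Python) =====
-- def countVowelConsonant(s):
--     freq = {}
--     for c in s:
--         freq[c] = freq.get(c, 0) + 1
--     total = 0
--     for ch, n in freq.items():
--         total += n * (1 if ch in {'a', 'e', 'i', 'o', 'u'} else 2)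
--     return total
-- ===== Notes on version B (the rewrite author's own statement) =====
-- stated objective: alternative
-- what changed: B builds a character-frequency dictionary (a hand-rolled Counter) in a first pass and then computes the total as a weighted sum over the distinct characters (count*1 for vowels, count*2 otherwise), instead of A's per-character 1/2 branch accumulator over the whole string.
import Mathlib
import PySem

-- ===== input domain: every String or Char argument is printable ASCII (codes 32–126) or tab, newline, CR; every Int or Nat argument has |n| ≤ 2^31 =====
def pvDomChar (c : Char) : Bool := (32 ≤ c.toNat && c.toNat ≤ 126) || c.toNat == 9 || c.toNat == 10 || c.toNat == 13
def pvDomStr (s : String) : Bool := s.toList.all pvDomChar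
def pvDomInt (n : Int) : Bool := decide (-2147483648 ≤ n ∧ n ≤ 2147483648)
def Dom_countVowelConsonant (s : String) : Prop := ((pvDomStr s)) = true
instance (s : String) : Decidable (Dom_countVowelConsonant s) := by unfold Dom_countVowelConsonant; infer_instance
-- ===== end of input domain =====

-- B builds a character-frequency dictionary in one pass and totals a weighted sum over the
-- distinct characters (count*1 for vowels, count*2 otherwise) instead of A's per-character
-- 1/2 branch accumulator; alternative algorithm, same asymptotic cost.


-- ===== PORT A =====
-- literal port of A: fold over the characters, adding 1 for a vowel, 2 otherwise
def countVowelConsonant (s : String) : Int :=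
  s.toList.foldl (fun sum c =>
    if c ∈ ['a', 'e', 'i', 'o', 'u'] then sum + 1 else sum + 2) 0

-- ===== PORT B =====
-- literal port of Source B: first loop builds the frequency dict (freq[c] = freq.get(c,0)+1),
-- second loop sums n * (1 if vowel else 2) over its items
def countVowelConsonant_alt (s : String) : Int :=
  let freq : PySem.Dict Char Int :=
    s.toList.foldl (fun d c => d.insert c (d.getD c 0 + 1)) PySem.Dict.empty
  freq.items.foldl (fun total p =>
    total + p.2 * (if p.1 ∈ ['a', 'e', 'i', 'o', 'u'] then 1 else 2)) 0

-- ===== PRECONDITION & SPEC =====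
def Spec_countVowelConsonant (s : String) (out : Int) : Prop := out = countVowelConsonant_alt s
instance (s : String) (out : Int) : Decidable (Spec_countVowelConsonant s out) := by unfold Spec_countVowelConsonant; infer_instance

-- ===== CLAIM (what is proved, stated in full; the proofs are below) =====
def Claim_equal_countVowelConsonant : Prop := ∀ (s : String), Dom_countVowelConsonant s → Spec_countVowelConsonant s (countVowelConsonant s)

-- ===== LEMMAS AND PROOFS =====

-- A's fold computes the plain weighted sum over all characters
theorem countVC_A_eq_sum (l : List Char) (acc : Int) :
    l.foldl (fun sum c =>
      if c ∈ ['a', 'e', 'i', 'o', 'u'] then sum + 1 else sum + 2) acc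
    = acc + (l.map (fun c => if c ∈ ['a', 'e', 'i', 'o', 'u'] then (1 : Int) else 2)).sum := by
  induction l generalizing acc with
  | nil => simp
  | cons c t ih =>
    simp only [List.foldl_cons, List.map_cons, List.sum_cons, ih]
    by_cases h : c ∈ ['a', 'e', 'i', 'o', 'u'] <;> simp [h] <;> ring

-- a foldl accumulating '+ f p' is a map-sum
theorem foldl_add_eq_sum {α : Type} (f : α → Int) (l : List α) (a : Int) :
    l.foldl (fun t p => t + f p) a = a + (l.map f).sum := by
  induction l generalizing a with
  | nil => simp
  | cons x t ih => simp [ih]; ring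

-- on a Nodup list containing a, the indicator-weighted sum picks out w a
theorem sum_map_indicator (w : Char → Int) (d : List Char) (a : Char)
    (hd : d.Nodup) (ha : a ∈ d) :
    (d.map (fun c => if c = a then w c else 0)).sum = w a := by
  induction d with
  | nil => cases ha
  | cons x t ih =>
    have hnd := List.nodup_cons.mp hd
    rcases List.mem_cons.mp ha with rfl | h
    · 
      have hz : ∀ y ∈ t.map (fun c => if c = a then w c else 0), y = 0 := by
        intro y hy
        rcases List.mem_map.mp hy with ⟨c, hc, rfl⟩
        have : c ≠ a := fun h => hnd.1 (h ▸ hc)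
        simp [this]
      simp [List.sum_eq_zero hz]
    · have hxa : x ≠ a := fun he => hnd.1 (he ▸ h)
      simp [hxa, ih hnd.2 h]

-- grouping: summing count(c) * w(c) over a Nodup cover of l equals summing w over l
theorem sum_grouped (w : Char → Int) (d : List Char) (hd : d.Nodup)
    (l : List Char) (hl : ∀ c ∈ l, c ∈ d) :
    (d.map (fun c => (l.count c : Int) * w c)).sum = (l.map w).sum := by
  induction l with
  | nil => simp
  | cons a t ih =>
    have ha : a ∈ d := hl a (List.mem_cons_self ..)
    have ht : ∀ c ∈ t, c ∈ d := fun c hc => hl c (List.mem_cons_of_mem _ hc)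
    have step : (d.map (fun c => ((a :: t).count c : Int) * w c)).sum
        = (d.map (fun c => (t.count c : Int) * w c)).sum
          + (d.map (fun c => if c = a then w c else 0)).sum := by
      rw [← List.sum_map_add]
      apply congrArg
      apply List.map_congr_left
      intro c _
      by_cases h : c = a
      · subst h; simp; ring
      · have : ¬ (a = c) := fun h' => h h'.symm
        simp [h, this]
    rw [step, ih ht, sum_map_indicator w d a hd ha]
    simp; ring

-- ===== VERDICT (by name: the statement is the Claim_ definition above) =====
theorem countVowelConsonant_spec : Claim_equal_countVowelConsonant := by
  intro s _
  unfold Spec_countVowelConsonant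
  simp only [countVowelConsonant, countVowelConsonant_alt,
    PySem.Dict.foldl_insert_getD_add_one_eq_counter, PySem.Dict.items_counter]
  rw [countVC_A_eq_sum,
      foldl_add_eq_sum (fun p : Char × Int => p.2 * (if p.1 ∈ ['a','e','i','o','u'] then 1 else 2)),
      List.map_map]
  simp only [Function.comp_def]
  rw [sum_grouped (fun c => if c ∈ ['a','e','i','o','u'] then (1 : Int) else 2)
        (PySem.Set.ofList s.toList) (PySem.Set.nodup_ofList s.toList) s.toList
        (fun c hc => (PySem.Set.mem_ofList s.toList c).2 hc)]
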